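-- pv_equiv track=rewrite | github.com/njfdev/advent-of-code | 2023/day-12/main.py | wildcard_valid_count
-- ===== SOURCE A (Python) =====
-- def check_is_valid(data, lengths):
--     # get all groups of #s
--     groups = []
--
--     was_last_valid = False
--     for i in range(len(data)):
--         if data[i] == "#":
--             if was_last_valid:
--                 groups[-1].append(i)
--             else:
--                 groups.append([i])
--             was_last_valid = True
--         else:
--             was_last_valid = False
--
--     if lengths == [len(x) for x in groups]:
--         return True
--     else:
--         return False
--
-- def wildcard_valid_count(data, lengths):
--     # there are multiple wildcards (?), go through all possible combinations of replacing them with "#" or "."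
--     total = 0
--     for char in ["#", "."]:
--         if data.count("?") == 0:
--             return 1
--         # if the count of wildcards is 1
--         elif data.count("?") == 1:
--             # check if it is valid
--             if check_is_valid(data.replace("?", char, 1), lengths):
--                 total += 1
--         else:
--             # if there are more than 1 wildcards, recurse
--             total += wildcard_valid_count(data.replace("?", char, 1), lengths)
--
--     return total
-- ===== SOURCE B (Python) =====
-- def wildcard_valid_count(data, lengths):
--     # Bottom-up DP over (string position, group index) instead of A's recursive enumeration.
--     # Like A, a string with no '?' counts as 1 arrangement without checking validity.
--     if '?' not in data:
--         return 1
--     n, m = len(data), len(lengths)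
--     # rows[t] is the DP row for position i+1+t; row[j] = number of ways to complete
--     # data[pos:] against lengths[j:]; built from position n+1 down to 0.
--     rows = [[0] * m + [1]]  # row for position n+1 (just past the separator after a last group ending at n-1)
--     for i in range(n, -1, -1):
--         row = []
--         for j in range(m + 1):
--             if j == m:
--                 row.append(0 if '#' in data[i:] else 1)
--             elif i < n:
--                 c = data[i]
--                 dot = rows[0][j] if c != '#' else 0
--                 hash_ = 0
--                 if c in ('#', '?'):
--                     L = lengths[j]
--                     if 1 <= L and i + L <= n and all(ch in '#?' for ch in data[i:i + L]) \
--                             and (i + L == n or data[i + L] != '#'):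
--                         hash_ = rows[L][j + 1]
--                 row.append(dot + hash_)
--             else:
--                 row.append(0)
--         rows.insert(0, row)
--     return rows[0][0]
-- ===== Notes on version B (the rewrite author's own statement) =====
-- stated objective: alternative
-- what changed: Replaces A's recursive enumeration of all 2^k replacements of '?' by a bottom-up dynamic program over (string position, group index), keeping A's rule that a string without '?' counts as 1.
import Mathlib
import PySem

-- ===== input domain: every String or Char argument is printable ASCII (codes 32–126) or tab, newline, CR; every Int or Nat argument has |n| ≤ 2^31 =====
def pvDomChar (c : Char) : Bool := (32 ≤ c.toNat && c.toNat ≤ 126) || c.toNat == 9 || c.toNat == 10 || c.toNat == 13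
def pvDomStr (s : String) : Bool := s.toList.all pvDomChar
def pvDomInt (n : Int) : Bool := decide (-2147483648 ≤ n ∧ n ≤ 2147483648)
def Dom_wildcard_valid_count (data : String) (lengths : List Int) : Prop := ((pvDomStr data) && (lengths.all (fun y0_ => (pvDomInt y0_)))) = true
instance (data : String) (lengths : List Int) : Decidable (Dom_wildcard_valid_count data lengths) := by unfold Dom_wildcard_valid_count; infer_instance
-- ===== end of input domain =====

-- B replaces A's recursive enumeration of all '?'-replacements by a bottom-up DP over
-- (string position, group index); same return value everywhere (objective: alternative).

-- ===== PORT A =====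

-- check_is_valid: the index loop building `groups` (a list of lists of indices), then
-- `lengths == [len(x) for x in groups]`.
def pvCheckIsValid (d : List Char) (lengths : List Int) : Bool :=
  let st :=
    (PySem.List.pyRange 0 (d.length : Int) 1).foldl
      (fun (st : List (List Int) × Bool) i =>
        -- data[i]: i is always in range here, so the default is never used
        if PySem.List.pyGetD d i ' ' = '#' then
          (if st.2 then st.1.dropLast ++ [st.1.getLastD [] ++ [i]] else st.1 ++ [[i]], true)
        else (st.1, false))
      ([], false)
  lengths == st.1.map (fun g => (g.length : Int))

-- data.replace("?", c, 1): replace the FIRST occurrence of the single character '?'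
-- (exact hand port: for a one-character pattern this is replacement of the first '?').
def pvReplaceFirst (d : List Char) (c : Char) : List Char :=
  match d with
  | [] => []
  | x :: t => if x = '?' then c :: t else x :: pvReplaceFirst t c

-- data.count("?") (PySem.Chars.count) for a one-character pattern is List.count: proved
-- here because the port's termination argument needs it.
theorem pvCountGoSingleton (c : Char) : ∀ (fuel : Nat) (l : List Char) (acc : Nat),
    l.length ≤ fuel → PySem.Chars.count.go [c] fuel l acc = acc + l.count c := by
  intro fuel
  induction fuel with
  | zero =>
    intro l acc h
    cases l with
    | nil => simp [PySem.Chars.count.go]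
    | cons x t => simp at h
  | succ f ih =>
    intro l acc h
    cases l with
    | nil => simp [PySem.Chars.count.go]
    | cons x t =>
      by_cases hc : c = x
      · subst hc
        have hpre : [c].isPrefixOf (c :: t) = true := by simp [List.isPrefixOf]
        simp only [PySem.Chars.count.go, hpre, if_pos]
        rw [List.length_singleton, List.drop_one, List.tail_cons,
          ih t (acc + 1) (by simpa using Nat.lt_succ_iff.mp (by simpa using h)),
          List.count_cons_self]
        omega
      · have hpre : [c].isPrefixOf (x :: t) = false := by
          simp [List.isPrefixOf, hc]
        simp only [PySem.Chars.count.go, hpre, Bool.false_eq_true, if_neg, not_false_iff]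
        rw [ih t acc (by simpa using Nat.lt_succ_iff.mp (by simpa using h)),
          List.count_cons_of_ne (by simpa using Ne.symm hc)]

theorem pvCountSingleton (l : List Char) (c : Char) :
    PySem.Chars.count l [c] = l.count c := by
  simp [PySem.Chars.count, pvCountGoSingleton c l.length l 0 le_rfl]

theorem pvReplaceFirstCount (d : List Char) (c : Char) (hc : c ≠ '?') (h : '?' ∈ d) :
    (pvReplaceFirst d c).count '?' + 1 = d.count '?' := by
  induction d with
  | nil => cases h
  | cons x t ih =>
    by_cases hx : x = '?'
    · subst hx
      simp [pvReplaceFirst, List.count_cons, hc]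
    · have ht : '?' ∈ t := by
        rcases List.mem_cons.mp h with h' | h'
        · exact absurd h'.symm hx
        · exact h'
      simp only [pvReplaceFirst, if_neg hx, List.count_cons]
      rw [← ih ht]
      omega

-- wildcard_valid_count: the loop `for char in ["#", "."]` is unrolled (its guard
-- `data.count("?")` does not depend on char): count 0 returns 1 on the first pass;
-- count 1 adds the two validity indicators; otherwise the two recursive calls.
def pvWvcAux (d : List Char) (lengths : List Int) : Int :=
  if PySem.Chars.count d ['?'] = 0 then 1
  else if PySem.Chars.count d ['?'] = 1 then
    (if pvCheckIsValid (pvReplaceFirst d '#') lengths then (1 : Int) else 0) +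
    (if pvCheckIsValid (pvReplaceFirst d '.') lengths then (1 : Int) else 0)
  else
    pvWvcAux (pvReplaceFirst d '#') lengths + pvWvcAux (pvReplaceFirst d '.') lengths
termination_by PySem.Chars.count d ['?']
decreasing_by
  · simp only [pvCountSingleton] at *
    have hm : '?' ∈ d := List.count_pos_iff.mp (by omega)
    have := pvReplaceFirstCount d '#' (by decide) hm
    omega
  · simp only [pvCountSingleton] at *
    have hm : '?' ∈ d := List.count_pos_iff.mp (by omega)
    have := pvReplaceFirstCount d '.' (by decide) hm
    omega

def wildcard_valid_count (data : String) (lengths : List Int) : Int :=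
  pvWvcAux data.toList lengths

-- ===== PORT B =====

-- One DP row for position i, given rows = [row (i+1), …, row (n+1)] (Source B's inner j-loop).
def pvRowB (d : List Char) (lengths : List Int) (n m i : Nat) (rows : List (List Int)) : List Int :=
  (List.range (m + 1)).map (fun j =>
    if j = m then
      -- '#' in data[i:]
      (if PySem.Chars.isIn ['#'] (d.drop i) then (0 : Int) else 1)
    else if i < n then
      let c := d.getD i ' '   -- data[i], in range since i < n
      let dot : Int := if c ≠ '#' then (rows.headD []).getD j 0 else 0   -- rows[0][j], in range
      let hash : Int :=
        if c = '#' ∨ c = '?' then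
          let L := lengths.getD j 0   -- lengths[j], in range since j < m
          if 1 ≤ L ∧ (i : Int) + L ≤ (n : Int) ∧
              -- all(ch in '#?' for ch in data[i:i+L]); the slice is exact take/drop here
              ((d.drop i).take L.toNat).all (fun ch => ch = '#' || ch = '?') ∧
              ((i : Int) + L = (n : Int) ∨ d.getD (i + L.toNat) ' ' ≠ '#')   -- data[i+L], in range when read
          then (rows.getD L.toNat []).getD (j + 1) 0   -- rows[L][j+1], in range under the guard
          else 0
        else 0
      dot + hash
    else 0)

-- Source B's outer loop `for i in range(n, -1, -1)`, prepending each new row: after fuel k,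
-- the rows for positions n+1-k … n+1.
def pvRowsB (d : List Char) (lengths : List Int) (n m : Nat) : Nat → List (List Int)
  | 0 => [List.replicate m 0 ++ [1]]
  | k + 1 =>
    let prev := pvRowsB d lengths n m k
    pvRowB d lengths n m (n - k) prev :: prev

def wildcard_valid_count_alt (data : String) (lengths : List Int) : Int :=
  if PySem.Str.isIn "?" data then
    let d := data.toList
    ((pvRowsB d lengths d.length lengths.length (d.length + 1)).headD []).getD 0 0
  else 1

-- ===== PRECONDITION & SPEC =====
def Spec_wildcard_valid_count (data : String) (lengths : List Int) (out : Int) : Prop := out = wildcard_valid_count_alt data lengths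
instance (data : String) (lengths : List Int) (out : Int) : Decidable (Spec_wildcard_valid_count data lengths out) := by unfold Spec_wildcard_valid_count; infer_instance

-- ===== CLAIM (what is proved, stated in full; the proofs are below) =====
def Claim_equal_wildcard_valid_count : Prop := ∀ (data : String) (lengths : List Int), Dom_wildcard_valid_count data lengths → Spec_wildcard_valid_count data lengths (wildcard_valid_count data lengths)

-- ===== LEMMAS AND PROOFS =====

-- All ways to replace every '?' by '#' or '.', in A's branch order.
def pvCompletions : List Char → List (List Char)
  | [] => [[]]
  | c :: t =>
    if c = '?' then (pvCompletions t).map ('#' :: ·) ++ (pvCompletions t).map ('.' :: ·)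
    else (pvCompletions t).map (c :: ·)

-- Group lengths of a wildcard-free string, with an open run of r leading '#'s.
def pvGl : Nat → List Char → List Int
  | r, [] => if r = 0 then [] else [(r : Int)]
  | r, c :: t => if c = '#' then pvGl (r + 1) t else if r = 0 then pvGl 0 t else (r : Int) :: pvGl 0 t

-- Number of completions of l whose group lengths (with open run r) are exactly L.
def pvG (r : Nat) (l : List Char) (L : List Int) : Nat :=
  (pvCompletions l).countP (fun y => pvGl r y == L)

-- "a run can close after exactly k more cells": the next k cells exist and are '#'/'?',
-- and the cell after them (if any) is not '#'.
def pvCanClose (x : List Char) (k : Nat) : Bool :=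
  decide (k ≤ x.length) && (x.take k).all (fun ch => ch = '#' || ch = '?') && !(x[k]? == some '#')

-- ===== basic recurrences =====

theorem pvG_nil (r : Nat) (L : List Int) :
    pvG r [] L = if pvGl r [] == L then 1 else 0 := by
  simp [pvG, pvCompletions, List.countP_singleton]

theorem pvG_hash (r : Nat) (t : List Char) (L : List Int) :
    pvG r ('#' :: t) L = pvG (r + 1) t L := by
  simp only [pvG, pvCompletions, if_neg (by decide : ¬ ('#' = '?')), List.countP_map]
  rfl

theorem pvG_other (r : Nat) (c : Char) (t : List Char) (L : List Int)
    (h1 : c ≠ '#') (h2 : c ≠ '?') :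
    pvG r (c :: t) L =
      if r = 0 then pvG 0 t L
      else match L with
        | [] => 0
        | a :: M => if (r : Int) = a then pvG 0 t M else 0 := by
  simp only [pvG, pvCompletions, if_neg h2, List.countP_map]
  by_cases hr : r = 0
  · subst hr
    rw [if_pos rfl]
    apply List.countP_congr
    intro y _
    simp [Function.comp, pvGl, h1]
  · simp only [if_neg hr]
    cases L with
    | nil =>
      rw [List.countP_eq_zero]
      intro y _
      simp [Function.comp, pvGl, h1, hr]
    | cons a M =>
      by_cases ha : (r : Int) = a
      · simp only [if_pos ha]
        apply List.countP_congr
        intro y _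
        simp [Function.comp, pvGl, h1, hr, ha]
      · simp only [if_neg ha]
        rw [List.countP_eq_zero]
        intro y _
        simp [Function.comp, pvGl, h1, hr, ha]

theorem pvG_q (r : Nat) (t : List Char) (L : List Int) :
    pvG r ('?' :: t) L =
      pvG (r + 1) t L +
      (if r = 0 then pvG 0 t L
       else match L with
        | [] => 0
        | a :: M => if (r : Int) = a then pvG 0 t M else 0) := by
  have h1 : pvCompletions ('?' :: t) = (pvCompletions t).map ('#' :: ·) ++ (pvCompletions t).map ('.' :: ·) := by
    simp [pvCompletions]
  rw [pvG, h1, List.countP_append, List.countP_map, List.countP_map]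
  have hA : List.countP ((fun y => pvGl r y == L) ∘ fun x => '#' :: x) (pvCompletions t)
      = pvG (r + 1) t L := by
    apply List.countP_congr
    intro y _
    simp [Function.comp, pvGl]
  rw [hA]
  congr 1
  have hthis := pvG_other r '.' t L (by decide) (by decide)
  rw [pvG] at hthis
  have h2 : pvCompletions ('.' :: t) = (pvCompletions t).map ('.' :: ·) := by
    simp [pvCompletions]
  rw [h2, List.countP_map] at hthis
  rw [← hthis]

theorem pvGl_pos_ne_nil (y : List Char) : ∀ (r : Nat), 0 < r → pvGl r y ≠ [] := by
  induction y with
  | nil =>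
    intro r hr
    have hr0 : ¬ r = 0 := by omega
    simp [pvGl, hr0]
  | cons c t ih =>
    intro r hr
    have hr0 : ¬ r = 0 := by omega
    by_cases hc : c = '#'
    · simpa [pvGl, hc] using ih (r + 1) (by omega)
    · simp [pvGl, hc, hr0]

theorem pvGl_head_ge (y : List Char) : ∀ (r : Nat) (a : Int) (M : List Int), 0 < r →
    pvGl r y = a :: M → (r : Int) ≤ a := by
  induction y with
  | nil =>
    intro r a M hr h
    have hr0 : ¬ r = 0 := by omega
    simp only [pvGl, if_neg hr0] at h
    obtain ⟨h1, h2⟩ := List.cons_eq_cons.mp h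
    omega
  | cons c t ih =>
    intro r a M hr h
    have hr0 : ¬ r = 0 := by omega
    by_cases hc : c = '#'
    · simp only [pvGl, if_pos hc] at h
      have := ih (r + 1) a M (by omega) h
      omega
    · simp only [pvGl, if_neg hc, if_neg hr0] at h
      obtain ⟨h1, h2⟩ := List.cons_eq_cons.mp h
      omega

theorem pvG_overrun (x : List Char) (r : Nat) (a : Int) (M : List Int)
    (hr : 0 < r) (ha : a < (r : Int)) : pvG r x (a :: M) = 0 := by
  rw [pvG, List.countP_eq_zero]
  intro y _
  simp only [beq_iff_eq]
  intro h
  have := pvGl_head_ge y r a M hr h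
  omega

theorem pvG_pos_nilL (x : List Char) (r : Nat) (hr : 0 < r) : pvG r x [] = 0 := by
  rw [pvG, List.countP_eq_zero]
  intro y _
  simpa using pvGl_pos_ne_nil y r hr

theorem pvG_zero_nilL (x : List Char) : pvG 0 x [] = if '#' ∈ x then 0 else 1 := by
  induction x with
  | nil => simp [pvG_nil, pvGl]
  | cons c t ih =>
    by_cases hc : c = '#'
    · subst hc
      rw [pvG_hash, pvG_pos_nilL t 1 (by omega)]
      simp
    · by_cases hq : c = '?'
      · subst hq
        rw [pvG_q, pvG_pos_nilL t 1 (by omega), if_pos rfl, ih]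
        simp
      · rw [pvG_other 0 c t [] hc hq, if_pos rfl, ih]
        have hiff : ('#' = c ∨ '#' ∈ t) ↔ '#' ∈ t := by
          constructor
          · rintro (h | h)
            · exact absurd h.symm hc
            · exact h
          · exact Or.inr
        simp only [List.mem_cons, hiff]


theorem pvCanClose_zero (c : Char) (t : List Char) :
    pvCanClose (c :: t) 0 = !(c == '#') := by
  simp [pvCanClose]

theorem pvCanClose_succ (c : Char) (t : List Char) (k' : Nat) :
    pvCanClose (c :: t) (k' + 1) = ((c == '#' || c == '?') && pvCanClose t k') := by
  rw [Bool.eq_iff_iff]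
  simp only [pvCanClose, Bool.and_eq_true, Bool.or_eq_true, decide_eq_true_eq, List.all_cons,
    List.length_cons, List.take_succ_cons, List.getElem?_cons_succ, beq_iff_eq,
    Bool.not_eq_true', beq_eq_false_iff_ne, ne_eq]
  constructor
  · rintro ⟨⟨h1, ⟨h2, h3⟩⟩, h4⟩
    exact ⟨h2, ⟨by omega, h3⟩, h4⟩
  · rintro ⟨h2, ⟨h1, h3⟩, h4⟩
    exact ⟨⟨by omega, ⟨h2, h3⟩⟩, h4⟩

theorem pvRunLemma (x : List Char) : ∀ (r : Nat) (a : Int) (M : List Int), 0 < r →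
    pvG r x (a :: M) =
      if (r : Int) ≤ a ∧ pvCanClose x (a - r).toNat then
        pvG 0 (x.drop ((a - r).toNat + 1)) M
      else 0 := by
  induction x with
  | nil =>
    intro r a M hr
    have hcc : pvCanClose ([] : List Char) (a - r).toNat = decide ((a - r).toNat = 0) := by
      simp [pvCanClose]
    rw [pvG_nil, hcc]
    simp only [pvGl, if_neg (by omega : ¬ r = 0), List.drop_nil, pvG_nil, beq_iff_eq,
      decide_eq_true_eq]
    by_cases h1 : (r : Int) = a
    · by_cases h2 : M = []
      · subst h2
        rw [if_pos (by simp [h1]), if_pos ⟨by omega, by omega⟩, if_pos (by simp [pvGl])]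
      · rw [if_neg (by simp [h2]), if_pos ⟨by omega, by omega⟩, if_neg (by simp [pvGl, h2])]
    · rw [if_neg (by simp [h1]), if_neg (by rintro ⟨hle, hk⟩; omega)]
  | cons c t ih =>
    intro r a M hr
    by_cases hle : (r : Int) ≤ a
    · by_cases heq : (r : Int) = a
      · -- the run must close right here
        have hk : (a - r).toNat = 0 := by omega
        rw [hk]
        simp only [zero_add, List.drop_succ_cons, List.drop_zero, pvCanClose_zero]
        by_cases hc : c = '#'
        · subst hc
          rw [pvG_hash, pvG_overrun t (r + 1) a M (by omega) (by omega), if_neg]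
          simp
        · by_cases hq : c = '?'
          · subst hq
            rw [pvG_q, pvG_overrun t (r + 1) a M (by omega) (by omega),
              if_neg (by omega : ¬ r = 0)]
            show 0 + (if (r : Int) = a then pvG 0 t M else 0) = _
            rw [if_pos heq, if_pos ⟨hle, by simp [hc]⟩]
            omega
          · rw [pvG_other r c t (a :: M) hc hq, if_neg (by omega : ¬ r = 0)]
            show (if (r : Int) = a then pvG 0 t M else 0) = _
            rw [if_pos heq, if_pos ⟨hle, by simp [hc]⟩]
      · -- r < a : at least one more '#' is needed
        have hlt : (r : Int) < a := lt_of_le_of_ne hle heq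
        obtain ⟨k', hk'⟩ : ∃ k', (a - r).toNat = k' + 1 := ⟨(a - r).toNat - 1, by omega⟩
        have hk'' : (a - ((r : Nat) + 1 : Nat)).toNat = k' := by push_cast; omega
        rw [hk']
        simp only [List.drop_succ_cons, pvCanClose_succ]
        by_cases hc : c = '#'
        · subst hc
          rw [pvG_hash, ih (r + 1) a M (by omega), hk'']
          simp only [BEq.rfl, Bool.true_or, Bool.true_and]
          split_ifs with h1 h2 h2
          · rfl
          · exact absurd ⟨by push_cast; omega, h1.2⟩ h2
          · exact absurd ⟨by push_cast [Nat.cast_add] at h2 ⊢; omega, h2.2⟩ h1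
          · rfl
        · by_cases hq : c = '?'
          · subst hq
            rw [pvG_q, ih (r + 1) a M (by omega), hk'', if_neg (by omega : ¬ r = 0)]
            show _ + (if (r : Int) = a then pvG 0 t M else 0) = _
            rw [if_neg heq]
            have hb : (('?' : Char) == '#' || ('?' : Char) == '?') = true := by decide
            rw [hb]
            simp only [Bool.true_and, Nat.add_zero]
            split_ifs with h1 h2 h2
            · omega
            · exact absurd ⟨by push_cast; omega, h1.2⟩ h2
            · exact absurd ⟨by push_cast [Nat.cast_add] at h2 ⊢; omega, h2.2⟩ h1
            · omega
          · rw [pvG_other r c t (a :: M) hc hq, if_neg (by omega : ¬ r = 0)]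
            show (if (r : Int) = a then pvG 0 t M else 0) = _
            rw [if_neg heq]
            have hb : ((c == '#' || c == '?')) = false := by simp [hc, hq]
            rw [hb]
            simp
    · rw [pvG_overrun (c :: t) r a M hr (by omega), if_neg (by tauto)]

theorem pvG_q0 (t : List Char) (L : List Int) :
    pvG 0 ('?' :: t) L = pvG 1 t L + pvG 0 t L := by
  rw [pvG_q, if_pos rfl]

theorem pvG_other0 (c : Char) (t : List Char) (L : List Int) (hc : c ≠ '#') (hq : c ≠ '?') :
    pvG 0 (c :: t) L = pvG 0 t L := by
  rw [pvG_other 0 c t L hc hq, if_pos rfl]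

theorem pvCellEq (c : Char) (x : List Char) (a : Int) (M : List Int) :
    pvG 0 (c :: x) (a :: M) =
      (if c ≠ '#' then pvG 0 x (a :: M) else 0) +
      (if (c = '#' ∨ c = '?') ∧ (1 : Int) ≤ a ∧ pvCanClose x (a - 1).toNat then
        pvG 0 (x.drop ((a - 1).toNat + 1)) M else 0) := by
  have hrun := pvRunLemma x 1 a M (by omega)
  have hone : (((1 : Nat) : Int)) = 1 := by norm_num
  rw [hone] at hrun
  by_cases hc : c = '#'
  · subst hc
    rw [pvG_hash, hrun]
    have e1 : (if ('#' : Char) ≠ '#' then pvG 0 x (a :: M) else 0) = 0 := by simp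
    rw [e1, Nat.zero_add]
    by_cases h1 : (1 : Int) ≤ a ∧ pvCanClose x (a - 1).toNat = true
    · rw [if_pos h1, if_pos ⟨Or.inl rfl, h1⟩]
    · rw [if_neg h1, if_neg (by tauto)]
  · by_cases hq : c = '?'
    · subst hq
      rw [pvG_q0, hrun, Nat.add_comm]
      have e1 : (if ('?' : Char) ≠ '#' then pvG 0 x (a :: M) else 0) = pvG 0 x (a :: M) := by
        simp
      rw [e1]
      congr 1
      by_cases h1 : (1 : Int) ≤ a ∧ pvCanClose x (a - 1).toNat = true
      · rw [if_pos h1, if_pos ⟨Or.inr rfl, h1⟩]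
      · rw [if_neg h1, if_neg (by tauto)]
    · rw [pvG_other0 c x (a :: M) hc hq]
      rw [if_pos hc, if_neg (by tauto)]
      omega

theorem pvCompletions_no_q (l : List Char) (h : l.count '?' = 0) :
    pvCompletions l = [l] := by
  induction l with
  | nil => rfl
  | cons c t ih =>
    have hc : ¬ c = '?' := by
      intro he
      subst he
      simp [List.count_cons] at h
    have ht : t.count '?' = 0 := by
      simp [List.count_cons, hc] at h
      omega
    simp [pvCompletions, hc, ih ht]

theorem pvCompletions_rf (l : List Char) (h : '?' ∈ l) :
    pvCompletions l = pvCompletions (pvReplaceFirst l '#') ++ pvCompletions (pvReplaceFirst l '.') := by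
  induction l with
  | nil => cases h
  | cons c t ih =>
    by_cases hc : c = '?'
    · subst hc
      simp only [pvReplaceFirst, if_pos rfl]
      have h1 : pvCompletions ('#' :: t) = (pvCompletions t).map ('#' :: ·) := by
        simp [pvCompletions]
      have h2 : pvCompletions ('.' :: t) = (pvCompletions t).map ('.' :: ·) := by
        simp [pvCompletions]
      simp [pvCompletions, h1, h2]
    · have ht : '?' ∈ t := by
        rcases List.mem_cons.mp h with h' | h'
        · exact absurd h'.symm hc
        · exact h'
      simp only [pvReplaceFirst, if_neg hc]
      have e1 : pvCompletions (c :: t) = (pvCompletions t).map (c :: ·) := by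
        simp [pvCompletions, hc]
      have e2 : pvCompletions (c :: pvReplaceFirst t '#') = (pvCompletions (pvReplaceFirst t '#')).map (c :: ·) := by
        simp [pvCompletions, hc]
      have e3 : pvCompletions (c :: pvReplaceFirst t '.') = (pvCompletions (pvReplaceFirst t '.')).map (c :: ·) := by
        simp [pvCompletions, hc]
      rw [e1, e2, e3, ih ht, List.map_append]

theorem pvG_split (l : List Char) (L : List Int) (h : '?' ∈ l) :
    pvG 0 l L = pvG 0 (pvReplaceFirst l '#') L + pvG 0 (pvReplaceFirst l '.') L := by
  rw [pvG, pvCompletions_rf l h, List.countP_append]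
  rfl


-- ===== check_is_valid: the index loop computes the group lengths pvGl 0 d =====

def pvStep (st : List Int × Bool) (c : Char) : List Int × Bool :=
  if c = '#' then (if st.2 then st.1.dropLast ++ [st.1.getLastD 0 + 1] else st.1 ++ [1], true)
  else (st.1, false)

theorem pvGlFold (cs : List Char) :
    (∀ (gs : List Int) (r : Nat), 0 < r →
      (cs.foldl pvStep (gs ++ [(r : Int)], true)).1 = gs ++ pvGl r cs) ∧
    (∀ gs : List Int, (cs.foldl pvStep (gs, false)).1 = gs ++ pvGl 0 cs) := by
  induction cs with
  | nil =>
    constructor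
    · intro gs r hr
      have hr0 : ¬ r = 0 := by omega
      simp [pvGl, hr0]
    · intro gs
      simp [pvGl]
  | cons c t ih =>
    constructor
    · intro gs r hr
      have hr0 : ¬ r = 0 := by omega
      by_cases hc : c = '#'
      · subst hc
        have hcast : ((r : Int) + 1) = ((r + 1 : Nat) : Int) := by push_cast; ring
        have hstep : pvStep (gs ++ [(r : Int)], true) '#' = (gs ++ [((r + 1 : Nat) : Int)], true) := by
          simp only [pvStep, if_pos rfl, if_true, List.dropLast_concat, List.getLastD_concat, hcast]
        rw [List.foldl_cons, hstep, ih.1 gs (r + 1) (by omega)]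
        simp [pvGl]
      · have hstep : pvStep (gs ++ [(r : Int)], true) c = (gs ++ [(r : Int)], false) := by
          simp [pvStep, hc]
        rw [List.foldl_cons, hstep, ih.2 (gs ++ [(r : Int)])]
        simp [pvGl, hc, hr0]
    · intro gs
      by_cases hc : c = '#'
      · subst hc
        have hstep : pvStep (gs, false) '#' = (gs ++ [((1 : Nat) : Int)], true) := by
          simp [pvStep]
        rw [List.foldl_cons, hstep, ih.1 gs 1 (by omega)]
        simp [pvGl]
      · have hstep : pvStep (gs, false) c = (gs, false) := by simp [pvStep, hc]
        rw [List.foldl_cons, hstep, ih.2 gs]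
        simp [pvGl, hc]

-- the loop body of check_is_valid, over Nat indices into d
def pvIdxStep (d : List Char) (st : List (List Int) × Bool) (i : Nat) : List (List Int) × Bool :=
  if d.getD i ' ' = '#' then
    (if st.2 then st.1.dropLast ++ [st.1.getLastD [] ++ [(i : Int)]] else st.1 ++ [[(i : Int)]], true)
  else (st.1, false)

theorem pvIdxFold (d : List Char) :
    letI st := (List.range d.length).foldl (pvIdxStep d) ([], false)
    letI s := d.foldl pvStep ([], false)
    st.1.map (fun g => (g.length : Int)) = s.1 ∧ st.2 = s.2 ∧ (st.2 = true → st.1 ≠ []) := by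
  induction d using List.reverseRecOn with
  | nil => simp [pvStep]
  | append_singleton d c ih =>
    obtain ⟨ih1, ih2, ih3⟩ := ih
    have hlen : (d ++ [c]).length = d.length + 1 := by simp
    have hcong : (List.range d.length).foldl (pvIdxStep (d ++ [c])) ([], false)
        = (List.range d.length).foldl (pvIdxStep d) ([], false) := by
      apply PySem.List.foldl_congr_mem
      intro acc x hx
      have hxlt : x < d.length := List.mem_range.mp hx
      unfold pvIdxStep
      rw [List.getD_append _ _ _ _ hxlt]
    rw [hlen, List.range_succ, List.foldl_concat, List.foldl_concat, hcong]
    set st := (List.range d.length).foldl (pvIdxStep d) ([], false) with hst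
    set s := d.foldl pvStep ([], false) with hs
    have hgetc : (d ++ [c]).getD d.length ' ' = c := by
      simp [List.getD_eq_getElem?_getD, List.getElem?_concat_length]
    unfold pvIdxStep pvStep
    rw [hgetc]
    by_cases hc : c = '#'
    · rw [if_pos hc, if_pos hc]
      rw [← ih2]
      by_cases hfl : st.2
      · rw [if_pos hfl, if_pos hfl]
        have hne : st.1 ≠ [] := ih3 hfl
        obtain ⟨y, hy⟩ := Option.isSome_iff_exists.mp (List.getLast?_isSome.mpr hne)
        refine ⟨?_, rfl, fun _ => by simp⟩
        rw [← ih1, List.map_append]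
        have h5 : st.1.getLastD [] = y := by rw [List.getLastD_eq_getLast?, hy]; rfl
        have h6 : (List.map (fun g => ((g.length : Nat) : Int)) st.1).getLastD 0 = (y.length : Int) := by
          rw [List.getLastD_eq_getLast?, List.getLast?_map, hy]; rfl
        rw [List.map_dropLast, h6, h5]
        congr 1
        simp
      · rw [if_neg hfl, if_neg hfl]
        refine ⟨?_, rfl, fun _ => by simp⟩
        rw [← ih1, List.map_append]
        simp
    · rw [if_neg hc, if_neg hc]
      exact ⟨ih1, rfl, fun h => absurd h (by simp)⟩


-- ===== B: the DP table computes pvG on suffixes =====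

def pvSpecRow (d : List Char) (L : List Int) (i : Nat) : List Int :=
  (List.range (L.length + 1)).map (fun j => (pvG 0 (d.drop i) (L.drop j) : Int))

theorem pvSpecRow_getD (d : List Char) (L : List Int) (i j : Nat) (hj : j < L.length + 1) :
    (pvSpecRow d L i).getD j 0 = (pvG 0 (d.drop i) (L.drop j) : Int) :=
  PySem.List.getD_map_range _ _ _ _ hj

theorem pvSpecRow_past (d : List Char) (L : List Int) (i : Nat) (hi : d.length ≤ i) :
    pvSpecRow d L i = List.replicate L.length 0 ++ [1] := by
  have hdrop : d.drop i = [] := List.drop_eq_nil_of_le hi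
  apply List.ext_getElem
  · simp [pvSpecRow]
  · intro j h1 h2
    simp only [pvSpecRow, List.getElem_map, List.getElem_range, hdrop]
    by_cases hj : j < L.length
    · rw [List.getElem_append_left (by simpa using hj), List.getElem_replicate]
      obtain ⟨a, M, hLM⟩ : ∃ a M, L.drop j = a :: M := by
        have : j < L.length := hj
        cases hL : L.drop j with
        | nil => exact absurd (List.drop_eq_nil_iff.mp hL) (by omega)
        | cons a M => exact ⟨a, M, rfl⟩
      rw [hLM, pvG_nil]
      simp [pvGl]
    · have hjm : j = L.length := by
        simp only [pvSpecRow, List.length_map, List.length_range] at h1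
        omega
      subst hjm
      rw [List.getElem_append_right (by simp), List.drop_length, pvG_nil]
      simp [pvGl]

theorem pvRowB_spec (d : List Char) (L : List Int) (k : Nat) (hk : k ≤ d.length) :
    pvRowB d L d.length L.length (d.length - k)
      ((List.range' (d.length + 1 - k) (k + 1)).map (pvSpecRow d L))
      = pvSpecRow d L (d.length - k) := by
  set n := d.length with hn
  set m := L.length with hm
  set i := n - k with hi
  unfold pvRowB
  conv_rhs => unfold pvSpecRow
  apply List.map_congr_left
  intro j hj
  dsimp only
  have hjlt : j < m + 1 := List.mem_range.mp hj
  by_cases hjm : j = m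
  · subst hjm
    rw [if_pos rfl, List.drop_length, pvG_zero_nilL]
    by_cases hmem : '#' ∈ d.drop i
    · rw [if_pos ((PySem.Chars.isIn_iff_infix _ _).mpr ((List.singleton_infix_iff _ _).mpr hmem)),
        if_pos hmem]
      rfl
    · rw [if_neg (fun hc => hmem ((List.singleton_infix_iff _ _).mp
        ((PySem.Chars.isIn_iff_infix _ _).mp hc))), if_neg hmem]
      rfl
  · rw [if_neg hjm]
    have hjm' : j < m := by omega
    have hLM : L.drop j = L[j] :: L.drop (j + 1) := List.drop_eq_getElem_cons hjm'
    have hLj : L.getD j 0 = L[j] := List.getD_eq_getElem _ _ hjm'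
    by_cases hin : i < n
    · rw [if_pos hin]
      have hk1 : 1 ≤ k := by omega
      have hs : n + 1 - k = i + 1 := by omega
      have hc : d.getD i ' ' = d[i] := List.getD_eq_getElem _ _ (by omega)
      have hdropd : d.drop i = d[i] :: d.drop (i + 1) := List.drop_eq_getElem_cons (by omega)
      have hhead : ((List.range' (n + 1 - k) (k + 1)).map (pvSpecRow d L)).headD []
          = pvSpecRow d L (i + 1) := by
        rw [hs, List.range'_succ]
        simp
      have hgetrow : ∀ t, t < k + 1 →
          ((List.range' (n + 1 - k) (k + 1)).map (pvSpecRow d L)).getD t []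
            = pvSpecRow d L (i + 1 + t) := by
        intro t ht
        rw [List.getD_eq_getElem?_getD, List.getElem?_map,
          List.getElem?_eq_getElem (by simpa using ht)]
        simp [List.getElem_range', hs]
      rw [hdropd, hLM, pvCellEq]
      rw [hc, hhead, hLj]
      push_cast
      congr 1
      · -- the '.' branch
        by_cases hch : d[i] = '#'
        · rw [if_neg (by simp [hch]), if_neg (by simp [hch])]
        · rw [if_pos (by simp [hch]), if_pos (by simp [hch]),
            pvSpecRow_getD d L (i + 1) j hjlt, ← hLM]
      · -- the '#' branch
        by_cases hcq : d[i] = '#' ∨ d[i] = '?'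
        · rw [if_pos hcq]
          set a := L[j] with haL
          set x := d.drop (i + 1) with hx
          have hxlen : x.length = n - (i + 1) := by rw [hx, List.length_drop]
          by_cases hg : (1 : Int) ≤ a ∧ pvCanClose x (a - 1).toNat = true
          · -- run closes: both guards hold
            obtain ⟨ha1, hcc⟩ := hg
            have haN : ((a.toNat : Nat) : Int) = a := Int.toNat_of_nonneg (by omega)
            obtain ⟨hccl, hcca, hccs⟩ : ((a - 1).toNat ≤ x.length
                ∧ (x.take (a - 1).toNat).all (fun ch => ch = '#' || ch = '?') = true
                ∧ ¬ x[(a - 1).toNat]? = some '#') := by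
              have := hcc
              simp only [pvCanClose, Bool.and_eq_true, decide_eq_true_eq,
                Bool.not_eq_true', beq_eq_false_iff_ne, ne_eq] at this
              exact ⟨this.1.1, this.1.2, this.2⟩
            have hian : (i : Int) + a ≤ (n : Int) := by omega
            have hkk : a.toNat = (a - 1).toNat + 1 := by omega
            have htake : (d[i] :: x).take a.toNat = d[i] :: x.take (a - 1).toNat := by
              rw [hkk, List.take_succ_cons]
            have hsep' : x[(a - 1).toNat]? = d[i + a.toNat]? := by
              rw [hx, List.getElem?_drop]
              congr 1
              omega
            have hguard : (1 ≤ a ∧ (i : Int) + a ≤ (n : Int) ∧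
                ((d[i] :: x).take a.toNat).all (fun ch => ch = '#' || ch = '?') = true ∧
                ((i : Int) + a = (n : Int) ∨ d.getD (i + a.toNat) ' ' ≠ '#')) := by
              refine ⟨ha1, hian, ?_, ?_⟩
              · rw [htake, List.all_cons, hcca]
                rcases hcq with h | h <;> simp [h]
              · by_cases hend : (i : Int) + a = (n : Int)
                · exact Or.inl hend
                · refine Or.inr ?_
                  have hlt2 : i + a.toNat < n := by omega
                  rw [List.getD_eq_getElem _ _ hlt2]
                  intro hbad
                  apply hccs
                  rw [hsep', List.getElem?_eq_getElem hlt2, hbad]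
            rw [if_pos hguard, if_pos ⟨hcq, ha1, hcc⟩]
            have hat : a.toNat < k + 1 := by omega
            rw [hgetrow a.toNat hat, pvSpecRow_getD d L (i + 1 + a.toNat) (j + 1) (by omega)]
            rw [hx, List.drop_drop]
            congr 3
            omega
          · -- run cannot close: both guards fail
            rw [if_neg ?_, if_neg (fun h => hg ⟨h.2.1, h.2.2⟩)]
            intro hbg
            obtain ⟨ha1, hian, hall, hsep⟩ := hbg
            apply hg
            refine ⟨ha1, ?_⟩
            have haN : ((a.toNat : Nat) : Int) = a := Int.toNat_of_nonneg (by omega)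
            have hkk : a.toNat = (a - 1).toNat + 1 := by omega
            have htake : (d[i] :: x).take a.toNat = d[i] :: x.take (a - 1).toNat := by
              rw [hkk, List.take_succ_cons]
            rw [htake, List.all_cons, Bool.and_eq_true] at hall
            have hsep' : x[(a - 1).toNat]? = d[i + a.toNat]? := by
              rw [hx, List.getElem?_drop]
              congr 1
              omega
            simp only [pvCanClose, Bool.and_eq_true, decide_eq_true_eq,
              Bool.not_eq_true', beq_eq_false_iff_ne, ne_eq]
            refine ⟨⟨by omega, hall.2⟩, ?_⟩
            rcases hsep with hend | hne
            · rw [hsep', List.getElem?_eq_none (by omega : d.length ≤ i + a.toNat)]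
              simp
            · by_cases hend : (i : Int) + a = (n : Int)
              · rw [hsep', List.getElem?_eq_none (by omega : d.length ≤ i + a.toNat)]
                simp
              · have hlt2 : i + a.toNat < n := by omega
                rw [hsep', List.getElem?_eq_getElem hlt2]
                intro hbad
                apply hne
                rw [List.getD_eq_getElem _ _ hlt2]
                exact Option.some.inj hbad
        · rw [if_neg hcq, if_neg (fun h => hcq h.1)]
    · rw [if_neg hin]
      have hdrop : d.drop i = [] := List.drop_eq_nil_of_le (by omega)
      rw [hLM, hdrop, pvG_nil, ← hLj]
      simp [pvGl]

theorem pvRowsB_spec (d : List Char) (L : List Int) :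
    ∀ k, k ≤ d.length + 1 →
      pvRowsB d L d.length L.length k
        = (List.range' (d.length + 1 - k) (k + 1)).map (pvSpecRow d L) := by
  intro k
  induction k with
  | zero =>
    intro _
    show [List.replicate L.length 0 ++ [1]] = _
    rw [Nat.sub_zero, List.range'_one, List.map_singleton,
      pvSpecRow_past d L (d.length + 1) (by omega)]
  | succ k ihk =>
    intro hk1
    show pvRowB d L d.length L.length (d.length - k) (pvRowsB d L d.length L.length k) :: _ = _
    rw [ihk (by omega), pvRowB_spec d L k (by omega),
      show d.length + 1 - (k + 1) = d.length - k by omega,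
      show k + 1 + 1 = k + 2 by omega,
      show List.range' (d.length - k) (k + 2)
          = (d.length - k) :: List.range' (d.length - k + 1) (k + 1) from List.range'_succ,
      show d.length - k + 1 = d.length + 1 - k by omega,
      List.map_cons]

theorem pvB_eq (d : List Char) (L : List Int) :
    ((pvRowsB d L d.length L.length (d.length + 1)).headD []).getD 0 0 = (pvG 0 d L : Int) := by
  rw [pvRowsB_spec d L (d.length + 1) le_rfl, Nat.sub_self,
    show List.range' 0 (d.length + 1 + 1) = 0 :: List.range' 1 (d.length + 1) from List.range'_succ,
    List.map_cons, List.headD_cons, pvSpecRow_getD d L 0 0 (by omega), List.drop_zero, List.drop_zero]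

-- ===== check_is_valid agrees with pvGl =====

theorem pvCheckIsValid_eq (d : List Char) (L : List Int) :
    pvCheckIsValid d L = (L == pvGl 0 d) := by
  have hfold : ((PySem.List.pyRange 0 (d.length : Int) 1).foldl
      (fun (st : List (List Int) × Bool) i =>
        if PySem.List.pyGetD d i ' ' = '#' then
          (if st.2 then st.1.dropLast ++ [st.1.getLastD [] ++ [i]] else st.1 ++ [[i]], true)
        else (st.1, false)) ([], false))
      = (List.range d.length).foldl (pvIdxStep d) ([], false) := by
    rw [PySem.List.pyRange_zero_natCast, List.foldl_map]
    apply PySem.List.foldl_congr_mem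
    intro acc x hx
    unfold pvIdxStep
    rw [PySem.List.pyGetD_natCast]
  unfold pvCheckIsValid
  rw [hfold]
  dsimp only
  obtain ⟨h1, -, -⟩ := pvIdxFold d
  rw [h1, (pvGlFold d).2 []]
  rw [List.nil_append]

-- ===== A computes pvG =====

theorem pvA_eq : ∀ (nq : Nat) (d : List Char) (L : List Int), d.count '?' = nq + 1 →
    pvWvcAux d L = (pvG 0 d L : Int) := by
  intro nq
  induction nq with
  | zero =>
    intro d L h
    have hm : '?' ∈ d := List.count_pos_iff.mp (by omega)
    have hcnt : PySem.Chars.count d ['?'] = 1 := by rw [pvCountSingleton, h]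
    rw [pvWvcAux, hcnt, if_neg (by omega), if_pos rfl]
    have hone : ∀ c : Char, c ≠ '?' → pvG 0 (pvReplaceFirst d c) L
        = if pvCheckIsValid (pvReplaceFirst d c) L then 1 else 0 := by
      intro c hc
      have h0 : (pvReplaceFirst d c).count '?' = 0 := by
        have := pvReplaceFirstCount d c hc hm
        omega
      rw [pvG, pvCompletions_no_q _ h0, List.countP_singleton, pvCheckIsValid_eq]
      by_cases hv : pvGl 0 (pvReplaceFirst d c) = L
      · rw [if_pos (by simp [hv]), if_pos (by simp [hv])]
      · rw [if_neg (by simp [hv]), if_neg (by simp; exact fun he => hv he.symm)]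
    rw [pvG_split d L hm, hone '#' (by decide), hone '.' (by decide)]
    push_cast
    rfl
  | succ nq ihq =>
    intro d L h
    have hm : '?' ∈ d := List.count_pos_iff.mp (by omega)
    have hcnt : PySem.Chars.count d ['?'] = nq + 2 := by rw [pvCountSingleton, h]
    rw [pvWvcAux, hcnt, if_neg (by omega), if_neg (by omega)]
    have hrec : ∀ c : Char, c ≠ '?' → (pvReplaceFirst d c).count '?' = nq + 1 := by
      intro c hc
      have := pvReplaceFirstCount d c hc hm
      omega
    rw [ihq _ L (hrec '#' (by decide)), ihq _ L (hrec '.' (by decide)),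
      pvG_split d L hm]
    push_cast
    rfl

theorem wildcard_valid_count_main (data : String) (lengths : List Int) :
    wildcard_valid_count data lengths = wildcard_valid_count_alt data lengths := by
  unfold wildcard_valid_count wildcard_valid_count_alt
  have hql : ("?" : String).toList = ['?'] := rfl
  by_cases hq : '?' ∈ data.toList
  · rw [if_pos (by
      rw [PySem.Str.isIn_eq, hql]
      exact (PySem.Chars.isIn_iff_infix _ _).mpr ((List.singleton_infix_iff _ _).mpr hq))]
    obtain ⟨nq, hnq⟩ : ∃ nq, data.toList.count '?' = nq + 1 := by
      have := List.count_pos_iff.mpr hq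
      exact ⟨data.toList.count '?' - 1, by omega⟩
    rw [pvA_eq nq data.toList lengths hnq, pvB_eq]
  · rw [if_neg (by
      rw [PySem.Str.isIn_eq, hql]
      intro hc
      exact hq ((List.singleton_infix_iff _ _).mp ((PySem.Chars.isIn_iff_infix _ _).mp hc)))]
    have hcnt : PySem.Chars.count data.toList ['?'] = 0 := by
      rw [pvCountSingleton]
      exact List.count_eq_zero.mpr hq
    rw [pvWvcAux, hcnt, if_pos rfl]

-- ===== VERDICT (by name: the statement is the Claim_ definition above) =====
theorem wildcard_valid_count_spec : Claim_equal_wildcard_valid_count := by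
  intro data lengths _
  exact wildcard_valid_count_main data lengths
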